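-- pv_equiv track=rewrite | github.com/MerlinPCarson/Monopoles | mono_naive.py | place_mono
-- ===== SOURCE A (Python) =====
-- def is_additive(a, b, c):
--
--     monos = sorted([a,b,c])
--
--     if (monos[0] + monos[1] == monos[2]):
--         return True
--     return False
--
-- def place_mono(cur_monos, new_mono):
--
--     # base case, not enough monopoles in room to be additive
--     if len(cur_monos) < 2:
--         return True
--
--     for i, x in enumerate(cur_monos[:-1]):
--         for y in cur_monos[i+1:]:
--             if is_additive(x, y, new_mono) is True:
--                 return False
--     return True
-- ===== SOURCE B (Python) =====
-- def place_mono(cur_monos, new_mono):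
--     # O(n): a pair (x, y) is additive with n iff x + y + n == 2 * max(x, y, n),
--     # so for a given x the only possible partners are n - x, x - n and x + n.
--     n = new_mono
--     counts = {}
--     for m in cur_monos:
--         counts[m] = counts.get(m, 0) + 1
--     for x in counts:
--         for y in (n - x, x - n, x + n):
--             if x + y + n == 2 * max(x, y, n) and counts.get(y, 0) >= (2 if y == x else 1):
--                 return False
--     return True
-- ===== Notes on version B (the rewrite author's own statement) =====
-- stated objective: faster
-- what changed: Replaced the O(n^2) all-pairs scan (each pair sorted with the new value) by a single counting-dict pass: a pair (x,y) is additive with n iff x+y+n == 2*max(x,y,n), so for each distinct value x only the three candidates n-x, x-n, x+n are checked against the counts.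
import Mathlib
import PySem

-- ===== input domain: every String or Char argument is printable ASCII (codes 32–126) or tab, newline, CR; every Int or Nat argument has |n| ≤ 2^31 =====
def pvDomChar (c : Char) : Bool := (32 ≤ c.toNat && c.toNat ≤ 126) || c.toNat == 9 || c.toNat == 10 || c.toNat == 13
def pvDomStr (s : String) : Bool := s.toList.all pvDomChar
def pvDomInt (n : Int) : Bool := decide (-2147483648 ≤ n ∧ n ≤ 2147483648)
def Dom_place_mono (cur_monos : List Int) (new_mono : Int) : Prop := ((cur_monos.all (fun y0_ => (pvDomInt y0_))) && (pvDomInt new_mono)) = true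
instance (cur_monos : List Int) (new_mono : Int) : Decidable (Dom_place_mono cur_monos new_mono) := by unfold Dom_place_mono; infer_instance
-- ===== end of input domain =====

-- B replaces A's all-pairs scan by a one-pass counting dict with three candidate partners per distinct value.


-- ===== PORT A =====
-- is_additive: sorted([a,b,c]), then monos[0]+monos[1]==monos[2]; the indices 0,1,2 are
-- always in range (the list has length 3), so pyGetD with default 0 is exact here.
def is_additive (a b c : Int) : Bool :=
  let monos := PySem.List.sorted [a, b, c] (fun x => x) false
  if PySem.List.pyGetD monos 0 0 + PySem.List.pyGetD monos 1 0 == PySem.List.pyGetD monos 2 0 then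
    true
  else
    false

def place_mono (cur_monos : List Int) (new_mono : Int) : Bool :=
  if cur_monos.length < 2 then
    true
  else if (PySem.List.enumerate (PySem.List.slice cur_monos none (some (-1)))).any
      (fun p => (PySem.List.slice cur_monos (some (p.1 + 1)) none).any
        (fun y => is_additive p.2 y new_mono)) then
    false
  else
    true

-- ===== PORT B =====
def place_mono_alt (cur_monos : List Int) (new_mono : Int) : Bool :=
  let n := new_mono
  let counts := cur_monos.foldl (fun d m => d.insert m (d.getD m 0 + 1)) PySem.Dict.empty
  if counts.keys.any (fun x =>
      [n - x, x - n, x + n].any (fun y =>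
        decide (x + y + n = 2 * max (max x y) n) &&
        decide ((if y = x then (2 : Int) else 1) ≤ counts.getD y 0))) then
    false
  else
    true

-- ===== PRECONDITION & SPEC =====
def Spec_place_mono (cur_monos : List Int) (new_mono : Int) (out : Bool) : Prop := out = place_mono_alt cur_monos new_mono
instance (cur_monos : List Int) (new_mono : Int) (out : Bool) : Decidable (Spec_place_mono cur_monos new_mono out) := by unfold Spec_place_mono; infer_instance

-- ===== CLAIM (what is proved, stated in full; the proofs are below) =====
def Claim_equal_place_mono : Prop := ∀ (cur_monos : List Int) (new_mono : Int), Dom_place_mono cur_monos new_mono → Spec_place_mono cur_monos new_mono (place_mono cur_monos new_mono)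

-- ===== LEMMAS AND PROOFS =====

-- the additive-pair relation: the two smaller of x, y, n sum to the largest
def Eqn (x y n : Int) : Prop := x + y + n = 2 * max (max x y) n

theorem perm_bac (a b c : Int) : [b,a,c].Perm [a,b,c] := List.Perm.swap a b [c]
theorem perm_acb (a b c : Int) : [a,c,b].Perm [a,b,c] := (List.Perm.swap b c []).cons a
theorem perm_cab (a b c : Int) : [c,a,b].Perm [a,b,c] := (List.Perm.swap a c [b]).trans ((List.Perm.swap b c []).cons a)
theorem perm_bca (a b c : Int) : [b,c,a].Perm [a,b,c] := ((List.Perm.swap a c []).cons b).trans (List.Perm.swap a b [c])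
theorem perm_cba (a b c : Int) : [c,b,a].Perm [a,b,c] := (List.Perm.swap b c [a]).trans (perm_bca a b c)

theorem sorted3_eq (a b c p q r : Int) (hp : List.Perm [p,q,r] [a,b,c]) (h1 : p ≤ q) (h2 : q ≤ r) :
    PySem.List.sorted [a,b,c] (fun x => x) false = [p,q,r] :=
  PySem.List.sorted_id_eq_of_perm_of_pairwise _ _ hp (by
    simp [List.pairwise_cons]
    exact ⟨⟨h1, le_trans h1 h2⟩, h2⟩)

theorem is_additive_iff (a b n : Int) : is_additive a b n = true ↔ Eqn a b n := by
  unfold is_additive Eqn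
  rcases le_total a b with hab | hab <;> rcases le_total b n with hbn | hbn <;>
    rcases le_total a n with han | han
  · rw [sorted3_eq a b n a b n (List.Perm.refl _) hab hbn]
    simp [PySem.List.pyGetD, PySem.List.pyGet?, PySem.List.pyIdx?, max_def]; omega
  · rw [sorted3_eq a b n a b n (List.Perm.refl _) hab hbn]
    simp [PySem.List.pyGetD, PySem.List.pyGet?, PySem.List.pyIdx?, max_def]; omega
  · rw [sorted3_eq a b n a n b (perm_acb a b n) han hbn]
    simp [PySem.List.pyGetD, PySem.List.pyGet?, PySem.List.pyIdx?, max_def]; omega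
  · rw [sorted3_eq a b n n a b (perm_cab a b n) han hab]
    simp [PySem.List.pyGetD, PySem.List.pyGet?, PySem.List.pyIdx?, max_def]; omega
  · rw [sorted3_eq a b n b a n (perm_bac a b n) hab han]
    simp [PySem.List.pyGetD, PySem.List.pyGet?, PySem.List.pyIdx?, max_def]; omega
  · rw [sorted3_eq a b n b n a (perm_bca a b n) hbn han]
    simp [PySem.List.pyGetD, PySem.List.pyGet?, PySem.List.pyIdx?, max_def]; omega
  · rw [sorted3_eq a b n b a n (perm_bac a b n) hab han]
    simp [PySem.List.pyGetD, PySem.List.pyGet?, PySem.List.pyIdx?, max_def]; omega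
  · rw [sorted3_eq a b n n b a (perm_cba a b n) hbn hab]
    simp [PySem.List.pyGetD, PySem.List.pyGet?, PySem.List.pyIdx?, max_def]; omega

-- A's double loop fires exactly on an index pair i < j with Eqn xs[i] xs[j] n
theorem anyPairs_iff (xs : List Int) (n : Int) :
    ((PySem.List.enumerate (PySem.List.slice xs none (some (-1)))).any
        (fun p => (PySem.List.slice xs (some (p.1 + 1)) none).any
          (fun y => is_additive p.2 y n)) = true)
    ↔ ∃ i j, ∃ (_ : i < xs.length) (hj : j < xs.length), i < j ∧ Eqn xs[i] xs[j] n := by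
  rw [PySem.List.slice_to_neg_one]
  simp only [List.any_eq_true]
  constructor
  · rintro ⟨p, hp, y, hy, hadd⟩
    rw [PySem.List.mem_enumerate_iff] at hp
    obtain ⟨k, hk, rfl⟩ := hp
    simp only at hy hadd
    have hcast : (0 : Int) + (k : Int) + 1 = ((k + 1 : Nat) : Int) := by push_cast; ring
    rw [hcast, PySem.List.slice_from_natCast] at hy
    rw [List.mem_iff_getElem] at hy
    obtain ⟨m, hm, rfl⟩ := hy
    rw [List.length_drop] at hm
    have hklen : k < xs.length - 1 := by
      have := hk; rwa [List.length_dropLast] at this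
    refine ⟨k, k + 1 + m, by omega, by omega, by omega, ?_⟩
    rw [← is_additive_iff]
    simp only [List.getElem_dropLast, List.getElem_drop] at hadd
    exact hadd
  · rintro ⟨i, j, hi, hj, hij, heqn⟩
    have hilen : i < xs.dropLast.length := by rw [List.length_dropLast]; omega
    refine ⟨((i : Int), xs.dropLast[i]), ?_, ?_⟩
    · rw [PySem.List.mem_enumerate_iff]
      exact ⟨i, hilen, by simp⟩
    · simp only
      rw [show ((i : Int) + 1) = ((i + 1 : Nat) : Int) by push_cast; ring,
        PySem.List.slice_from_natCast]
      refine ⟨xs[j], ?_, ?_⟩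
      · rw [List.mem_iff_getElem]
        refine ⟨j - (i + 1), by rw [List.length_drop]; omega, ?_⟩
        rw [List.getElem_drop]
        congr 1
        omega
      · rw [is_additive_iff]
        simpa only [List.getElem_dropLast] using heqn

theorem place_mono_iff (xs : List Int) (n : Int) :
    place_mono xs n = true ↔ List.Pairwise (fun a b => ¬ Eqn a b n) xs := by
  rw [List.pairwise_iff_getElem]
  unfold place_mono
  split_ifs with hlen hany
  · simp only [true_iff]
    intro i j hi hj hij
    omega
  · rw [anyPairs_iff] at hany
    simp only [false_iff, not_forall]
    obtain ⟨i, j, hi, hj, hij, heqn⟩ := hany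
    exact ⟨i, j, hi, hj, hij, not_not_intro heqn⟩
  · rw [anyPairs_iff] at hany
    simp only [true_iff]
    intro i j hi hj hij heqn
    exact hany ⟨i, j, hi, hj, hij, heqn⟩

-- the value-level condition B tests
def BCond (xs : List Int) (n : Int) : Prop :=
  ∃ x ∈ xs, ∃ y, Eqn x y n ∧ ((y = x ∧ 2 ≤ xs.count x) ∨ (y ≠ x ∧ y ∈ xs))

theorem place_mono_alt_iff (xs : List Int) (n : Int) :
    place_mono_alt xs n = true ↔ ¬ BCond xs n := by
  unfold place_mono_alt BCond
  rw [PySem.Dict.foldl_insert_getD_add_one_eq_counter]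
  dsimp only
  split_ifs with h
  · simp only [false_iff, not_not]
    simp only [List.any_eq_true, PySem.Dict.keys_counter, PySem.Set.mem_ofList,
      Bool.and_eq_true, decide_eq_true_eq, PySem.Dict.getD_counter] at h
    obtain ⟨x, hx, y, hymem, heqn, hcnt⟩ := h
    refine ⟨x, hx, y, heqn, ?_⟩
    by_cases hyx : y = x
    · subst hyx
      rw [if_pos rfl] at hcnt
      exact Or.inl ⟨rfl, by exact_mod_cast hcnt⟩
    · rw [if_neg hyx] at hcnt
      refine Or.inr ⟨hyx, ?_⟩
      rw [← List.count_pos_iff]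
      omega
  · simp only [true_iff]
    intro hb
    apply h
    simp only [List.any_eq_true, PySem.Dict.keys_counter, PySem.Set.mem_ofList,
      Bool.and_eq_true, decide_eq_true_eq, PySem.Dict.getD_counter]
    obtain ⟨x, hx, y, heqn, hcase⟩ := hb
    refine ⟨x, hx, y, ?_, heqn, ?_⟩
    · -- y is one of the three candidates, from Eqn
      have := heqn
      unfold Eqn at this
      rcases max_cases (max x y) n with ⟨h1, _⟩ | ⟨h1, _⟩ <;>
        [ (rcases max_cases x y with ⟨h2, _⟩ | ⟨h2, _⟩ <;> rw [h1, h2] at this) ;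
          rw [h1] at this ] <;> simp <;> omega
    · rcases hcase with ⟨rfl, hcnt⟩ | ⟨hne, hmem⟩
      · rw [if_pos rfl]; exact_mod_cast hcnt
      · rw [if_neg hne]
        have : 0 < xs.count y := List.count_pos_iff.mpr hmem
        omega

theorem Eqn_comm (x y n : Int) : Eqn x y n ↔ Eqn y x n := by
  unfold Eqn
  rw [max_comm x y]
  constructor <;> intro h <;> omega

theorem pair_sublist_of_mem {xs : List Int} {x y : Int} (hx : x ∈ xs) (hy : y ∈ xs)
    (hne : x ≠ y) : [x, y].Sublist xs ∨ [y, x].Sublist xs := by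
  induction xs with
  | nil => simp at hx
  | cons a t ih =>
    rcases List.mem_cons.mp hx with rfl | hxt
    · have hyt : y ∈ t := by
        rcases List.mem_cons.mp hy with rfl | h
        · exact absurd rfl hne
        · exact h
      exact Or.inl (List.Sublist.cons₂ x (List.singleton_sublist.mpr hyt))
    · rcases List.mem_cons.mp hy with rfl | hyt
      · exact Or.inr (List.Sublist.cons₂ y (List.singleton_sublist.mpr hxt))
      · rcases ih hxt hyt with h | h
        · exact Or.inl (h.cons a)
        · exact Or.inr (h.cons a)

theorem two_le_count_of_lt {xs : List Int} {i j : Nat} (hij : i < j) (hj : j < xs.length)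
    (hv : xs[i]'(by omega) = xs[j]) : 2 ≤ xs.count (xs[j]) := by
  have hsplit := List.take_append_drop j xs
  have h1 : xs[j] ∈ xs.take j := by
    rw [List.mem_iff_getElem]
    refine ⟨i, by rw [List.length_take]; omega, ?_⟩
    rw [List.getElem_take]
    exact hv
  have h2 : xs[j] ∈ xs.drop j := by
    rw [List.mem_iff_getElem]
    refine ⟨0, by rw [List.length_drop]; omega, ?_⟩
    rw [List.getElem_drop]
    norm_num
  have c1 : 0 < (xs.take j).count xs[j] := List.count_pos_iff.mpr h1
  have c2 : 0 < (xs.drop j).count xs[j] := List.count_pos_iff.mpr h2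
  calc 2 ≤ (xs.take j).count xs[j] + (xs.drop j).count xs[j] := by omega
    _ = xs.count xs[j] := by rw [← List.count_append, hsplit]

theorem bcond_iff_not_pairwise (xs : List Int) (n : Int) :
    BCond xs n ↔ ¬ List.Pairwise (fun a b => ¬ Eqn a b n) xs := by
  constructor
  · rintro ⟨x, hx, y, heqn, hcase⟩ hpw
    rcases hcase with ⟨hyx, hcnt⟩ | ⟨hne, hy⟩
    · have hdup : [x, x].Sublist xs := by
        rw [← List.duplicate_iff_sublist, List.duplicate_iff_two_le_count]
        exact hcnt
      have := hpw.sublist hdup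
      rw [List.pairwise_cons] at this
      exact this.1 x (List.mem_singleton.mpr rfl) (hyx ▸ heqn)
    · rcases pair_sublist_of_mem hx hy (Ne.symm hne) with hs | hs
      · have := hpw.sublist hs
        rw [List.pairwise_cons] at this
        exact this.1 y (List.mem_singleton.mpr rfl) heqn
      · have := hpw.sublist hs
        rw [List.pairwise_cons] at this
        exact this.1 x (List.mem_singleton.mpr rfl) ((Eqn_comm x y n).mp heqn)
  · intro hpw
    rw [List.pairwise_iff_getElem] at hpw
    push_neg at hpw
    obtain ⟨i, j, hi, hj, hij, heqn⟩ := hpw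
    refine ⟨xs[i], List.getElem_mem hi, xs[j], heqn, ?_⟩
    by_cases hyx : xs[j] = xs[i]
    · refine Or.inl ⟨hyx, ?_⟩
      have := two_le_count_of_lt hij hj hyx.symm
      rwa [hyx] at this
    · exact Or.inr ⟨hyx, List.getElem_mem hj⟩

-- ===== VERDICT (by name: the statement is the Claim_ definition above) =====
theorem place_mono_spec : Claim_equal_place_mono := by
  intro xs n _
  unfold Spec_place_mono
  rw [Bool.eq_iff_iff, place_mono_iff, place_mono_alt_iff, bcond_iff_not_pairwise, not_not]
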